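-- pv_equiv track=rewrite | github.com/kyubin-l/advent-of-code | archive/2023/python/q12.py | pattern_iterator
-- ===== SOURCE A (Python) =====
-- from typing import Iterator
--
-- def pattern_iterator(pattern: str, max: int) -> Iterator[str]:
--     unknowns = [i for i, c in enumerate(pattern) if c == "?"]
--     num_bits = len(unknowns)
--     num_combinations = 2 ** (num_bits)
--     for i in range(num_combinations):
--         current_pattern = pattern
--         bits = [(i >> bit) & 1 for bit in range(num_bits - 1, -1, -1)]
--         if sum(bits) > max:
--             continue
--         for replace, replace_index in zip(bits, unknowns):
--             if replace == 0:
--                 continue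
--             current_pattern = (
--                 current_pattern[:replace_index]
--                 + "#"
--                 + current_pattern[replace_index + 1 :]
--             )
--         yield current_pattern
-- ===== SOURCE B (Python) =====
-- def pattern_iterator(pattern: str, max: int):
--     # Pruned depth-first search over the '?' positions only (recursion depth = number
--     # of '?'): at each one first leave it as '?', then (budget permitting) splice in
--     # a '#'.  Visiting '?' before '#' reproduces A's increasing-bit-mask order, and
--     # branches whose '#' budget is exhausted are never entered.
--     unknowns = [i for i, c in enumerate(pattern) if c == "?"]
--
--     def rec(pos, budget, current):
--         if pos == len(unknowns):
--             if budget >= 0: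
--                 yield current
--             return
--         yield from rec(pos + 1, budget, current)
--         if budget > 0:
--             i = unknowns[pos]
--             yield from rec(pos + 1, budget - 1, current[:i] + "#" + current[i + 1:])
--
--     return rec(0, max, pattern)
-- ===== Notes on version B (the rewrite author's own statement) =====
-- stated objective: alternative
-- what changed: A enumerates all 2^k bit masks over the '?' positions (skipping masks with too many set bits after computing their full bit lists); B is a pruned depth-first recursion over the '?' positions ('?' branch before '#' branch, which reproduces A's increasing-mask order), so it never materialises masks or bit lists and skips whole subtrees once the '#' budget is exhausted.
import Mathlib
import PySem

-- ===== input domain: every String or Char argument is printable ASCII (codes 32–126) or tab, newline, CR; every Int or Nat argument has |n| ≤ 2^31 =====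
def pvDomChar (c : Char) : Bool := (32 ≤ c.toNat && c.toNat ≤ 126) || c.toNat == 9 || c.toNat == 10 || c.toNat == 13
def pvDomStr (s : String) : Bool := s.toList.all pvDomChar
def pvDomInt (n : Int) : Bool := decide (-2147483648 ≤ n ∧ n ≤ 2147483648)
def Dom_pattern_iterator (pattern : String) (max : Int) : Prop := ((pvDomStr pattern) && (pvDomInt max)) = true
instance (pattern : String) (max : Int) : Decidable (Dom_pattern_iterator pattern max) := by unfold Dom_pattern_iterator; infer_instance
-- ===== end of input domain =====

-- B replaces A's scan of all 2^k bit masks by a pruned depth-first recursion over the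
-- '?' positions ('?' branch before '#' branch, reproducing A's increasing-mask order).
-- A is a generator; both ports return the list of yielded strings, built as char lists (exact).

-- ===== PORT A =====
-- unknowns = [i for i, c in enumerate(pattern) if c == "?"]
def pvUnk (cs : List Char) : List Int :=
  (PySem.List.enumerate cs 0).filterMap (fun ic => if ic.2 = '?' then some ic.1 else none)

-- the inner replacement loop over zip(bits, unknowns);
-- current_pattern[:i] + "#" + current_pattern[i+1:] is slice ++ '#' :: slice (exact)
def pvApply (bits : List Int) (unknowns : List Int) (cur : List Char) : List Char :=
  (bits.zip unknowns).foldl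
    (fun cur ri =>
      if ri.1 = 0 then cur
      else PySem.List.slice cur none (some ri.2) ++ '#' :: PySem.List.slice cur (some (ri.2 + 1)) none)
    cur

-- bits = [(i >> bit) & 1 for bit in range(num_bits - 1, -1, -1)]; bit ≥ 0 here, so .toNat is exact
def pvBitsPort (num_bits : Int) (i : Int) : List Int :=
  (PySem.List.pyRange (num_bits - 1) (-1) (-1)).map
    (fun bit => PySem.Int.band (i >>> bit.toNat) 1)

def pattern_iterator (pattern : String) (max : Int) : List String :=
  let cs := pattern.toList
  let unknowns := pvUnk cs
  let num_bits : Int := PySem.List.len unknowns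
  -- 2 ** num_bits with num_bits = len(unknowns) ≥ 0, so the Nat exponent is exact
  let num_combinations : Int := 2 ^ num_bits.toNat
  let out := (PySem.List.pyRange 0 num_combinations 1).foldl
    (fun acc i =>
      let bits := pvBitsPort num_bits i
      if bits.sum > max then acc
      else acc ++ [pvApply bits unknowns cs])
    []
  out.map String.ofList

-- ===== PORT B =====
-- def rec(pos, budget, current) — ported as structural recursion on the list of
-- remaining '?' positions; current[:i] + "#" + current[i+1:] is slice ++ '#' :: slice (exact)
def pvRecB : List Int → Int → List Char → List (List Char)
  | [], budget, current => if budget ≥ 0 then [current] else []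
  | i :: rest, budget, current =>
    pvRecB rest budget current ++
      (if budget > 0 then
        pvRecB rest (budget - 1)
          (PySem.List.slice current none (some i) ++ '#' :: PySem.List.slice current (some (i + 1)) none)
      else [])

def pattern_iterator_alt (pattern : String) (max : Int) : List String :=
  (pvRecB (pvUnk pattern.toList) max pattern.toList).map String.ofList

-- ===== PRECONDITION & SPEC =====
def Spec_pattern_iterator (pattern : String) (max : Int) (out : List String) : Prop := out = pattern_iterator_alt pattern max
instance (pattern : String) (max : Int) (out : List String) : Decidable (Spec_pattern_iterator pattern max out) := by unfold Spec_pattern_iterator; infer_instance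

-- ===== CLAIM (what is proved, stated in full; the proofs are below) =====
def Claim_equal_pattern_iterator : Prop := ∀ (pattern : String) (max : Int), Dom_pattern_iterator pattern max → Spec_pattern_iterator pattern max (pattern_iterator pattern max)

-- ===== LEMMAS AND PROOFS =====

-- proof-side middle form: per-character recursion, shared target of both ports
def pvRec : List Char → Int → List (List Char)
  | [], budget => if budget ≥ 0 then [[]] else []
  | c :: rest, budget =>
    if c = '?' then
      (pvRec rest budget).map (fun s => '?' :: s) ++
        (if budget > 0 then (pvRec rest (budget - 1)).map (fun s => '#' :: s) else [])
    else
      (pvRec rest budget).map (fun s => c :: s)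


theorem pvEnum_shift {α : Type} (xs : List α) (s : Int) :
    PySem.List.enumerate xs s = (PySem.List.enumerate xs 0).map (fun q => (q.1 + s, q.2)) := by
  induction xs generalizing s with
  | nil => simp [PySem.List.enumerate_nil]
  | cons x xs ih =>
    rw [PySem.List.enumerate_cons, PySem.List.enumerate_cons, ih (s+1), ih (0+1)]
    simp only [List.map_cons, List.map_map, zero_add]
    congr 1
    apply List.map_congr_left
    intro q _
    simp [add_comm, add_left_comm]

theorem pvUnk_cons (c : Char) (rest : List Char) :
    pvUnk (c :: rest) =
      if c = '?' then 0 :: (pvUnk rest).map (· + 1) else (pvUnk rest).map (· + 1) := by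
  unfold pvUnk
  rw [PySem.List.enumerate_cons, pvEnum_shift rest (0+1)]
  simp only [List.filterMap_cons, List.filterMap_map, List.map_filterMap, Function.comp, zero_add]
  have h : ∀ q : Int × Char,
      (if q.2 = '?' then some (q.1 + 1) else none) =
        Option.map (fun x => x + 1) (if q.2 = '?' then some q.1 else none) := by
    intro q; split <;> simp
  by_cases hc : c = '?' <;> simp [hc]

theorem pvUnk_nonneg (cs : List Char) : ∀ u ∈ pvUnk cs, 0 ≤ u := by
  induction cs with
  | nil => intro u hu; simp [pvUnk, PySem.List.enumerate_nil] at hu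
  | cons c rest ih =>
    intro u hu
    rw [pvUnk_cons] at hu
    by_cases hc : c = '?' <;> simp [hc] at hu
    · rcases hu with rfl | ⟨v, hv, rfl⟩
      · omega
      · have := ih v hv; omega
    · obtain ⟨v, hv, rfl⟩ := hu
      have := ih v hv; omega

theorem pvApply_cons (r u : Int) (bs us : List Int) (cur : List Char) :
    pvApply (r :: bs) (u :: us) cur =
      pvApply bs us
        (if r = 0 then cur
         else PySem.List.slice cur none (some u) ++ '#' :: PySem.List.slice cur (some (u + 1)) none) := rfl

theorem pvSlice_to_cons (c : Char) (t : List Char) (u : Int) (hu : 0 ≤ u) :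
    PySem.List.slice (c :: t) none (some (u + 1)) = c :: PySem.List.slice t none (some u) := by
  rw [PySem.List.slice_to _ (by omega), PySem.List.slice_to _ hu]
  have : (u + 1).toNat = u.toNat + 1 := by omega
  rw [this, List.take_succ_cons]

theorem pvSlice_from_cons (c : Char) (t : List Char) (u : Int) (hu : 0 ≤ u) :
    PySem.List.slice (c :: t) (some (u + 1)) none = PySem.List.slice t (some u) none := by
  rw [PySem.List.slice_from _ (by omega), PySem.List.slice_from _ hu]
  have : (u + 1).toNat = u.toNat + 1 := by omega
  rw [this, List.drop_succ_cons]

theorem pvApply_shift (bs : List Int) (us : List Int) (c : Char) (cur : List Char)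
    (h : ∀ u ∈ us, 0 ≤ u) :
    pvApply bs (us.map (· + 1)) (c :: cur) = c :: pvApply bs us cur := by
  induction bs generalizing us cur with
  | nil => rfl
  | cons r bs ih =>
    cases us with
    | nil => rfl
    | cons u us =>
      have hu : 0 ≤ u := h u (by simp)
      rw [List.map_cons, pvApply_cons, pvApply_cons]
      by_cases hr : r = 0
      · simp only [hr, reduceIte]
        exact ih us cur (fun v hv => h v (by simp [hv]))
      · simp only [if_neg hr]
        rw [pvSlice_to_cons c cur u hu, pvSlice_from_cons c cur (u+1) (by omega)]
        exact ih us _ (fun v hv => h v (by simp [hv]))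

theorem pvApply_head_zero (bs us : List Int) (cur : List Char)
    (h : ∀ u ∈ us, 0 ≤ u) :
    pvApply (0 :: bs) (0 :: us.map (· + 1)) ('?' :: cur) = '?' :: pvApply bs us cur := by
  rw [pvApply_cons, if_pos rfl]
  exact pvApply_shift bs us '?' cur h

theorem pvApply_head_one (r : Int) (hr : r ≠ 0) (bs us : List Int) (cur : List Char)
    (h : ∀ u ∈ us, 0 ≤ u) :
    pvApply (r :: bs) (0 :: us.map (· + 1)) ('?' :: cur) = '#' :: pvApply bs us cur := by
  rw [pvApply_cons, if_neg hr]
  rw [PySem.List.slice_to _ (le_refl 0), PySem.List.slice_from _ (by omega : (0:Int) ≤ 0 + 1)]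
  simp only [Int.toNat_zero, List.take_zero, List.nil_append]
  have : ((0:Int) + 1).toNat = 1 := by omega
  rw [this, List.drop_one, List.tail_cons]
  exact pvApply_shift bs us '#' cur h

def pvBits (k : Nat) (j : Nat) : List Int :=
  (List.range k).map (fun t => (((j >>> (k - 1 - t)) &&& 1 : Nat) : Int))

def pvMasks (k : Nat) : List (List Int) :=
  (List.range (2 ^ k)).map (pvBits k)

theorem pvBits_succ_lo (k j : Nat) (h : j < 2 ^ k) : pvBits (k + 1) j = 0 :: pvBits k j := by
  unfold pvBits
  rw [List.range_succ_eq_map, List.map_cons, List.map_map]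
  congr 1
  · simp [Nat.shiftRight_eq_div_pow, Nat.div_eq_of_lt h]
  · apply List.map_congr_left
    intro t _
    simp only [Function.comp]
    have hb : k + 1 - 1 - (t + 1) = k - 1 - t := by omega
    rw [hb]

theorem pvBits_succ_hi (k j : Nat) (h : j < 2 ^ k) :
    pvBits (k + 1) (2 ^ k + j) = 1 :: pvBits k j := by
  unfold pvBits
  rw [List.range_succ_eq_map, List.map_cons, List.map_map]
  congr 1
  · have h1 : (2 ^ k + j) >>> k = 1 := by
      rw [Nat.shiftRight_eq_div_pow, Nat.add_comm, Nat.add_div_right _ (Nat.two_pow_pos k), Nat.div_eq_of_lt h]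
    simp [h1]
  · apply List.map_congr_left
    intro t ht
    simp only [List.mem_range] at ht
    simp only [Function.comp]
    have hb : k + 1 - 1 - (t + 1) = k - 1 - t := by omega
    rw [hb]
    -- (2^k + j) >>> b ≡ j >>> b  (mod 2) for b < k
    have hbk : k - 1 - t < k := by omega
    set b := k - 1 - t with hbdef
    have key : (2 ^ k + j) >>> b &&& 1 = j >>> b &&& 1 := by
      rw [Nat.shiftRight_eq_div_pow, Nat.shiftRight_eq_div_pow,
          Nat.and_one_is_mod, Nat.and_one_is_mod]
      have hsplit : 2 ^ k = 2 ^ (k - b) * 2 ^ b := by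
        rw [← pow_add]; congr 1; omega
      have hdiv : (2 ^ k + j) / 2 ^ b = 2 ^ (k - b) + j / 2 ^ b := by
        rw [hsplit, Nat.add_comm, Nat.add_mul_div_right _ _ (Nat.two_pow_pos b), Nat.add_comm]
      rw [hdiv]
      have heven : 2 ^ (k - b) = 2 * 2 ^ (k - b - 1) := by
        rw [← pow_succ']; congr 1; omega
      omega
    rw [key]

theorem pvMasks_succ (k : Nat) :
    pvMasks (k + 1) = (pvMasks k).map (fun bs => 0 :: bs) ++ (pvMasks k).map (fun bs => 1 :: bs) := by
  unfold pvMasks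
  have h2 : 2 ^ (k + 1) = 2 ^ k + 2 ^ k := by rw [pow_succ]; omega
  rw [h2, List.range_add, List.map_append, List.map_map, List.map_map, List.map_map]
  congr 1
  · apply List.map_congr_left
    intro j hj
    simp only [List.mem_range] at hj
    exact pvBits_succ_lo k j hj
  · apply List.map_congr_left
    intro j hj
    simp only [List.mem_range] at hj
    exact pvBits_succ_hi k j hj

theorem pvMasks_nonneg (k : Nat) : ∀ bs ∈ pvMasks k, ∀ x ∈ bs, 0 ≤ x := by
  intro bs hbs x hx
  simp only [pvMasks, List.mem_map] at hbs
  obtain ⟨j, _, rfl⟩ := hbs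
  simp only [pvBits, List.mem_map] at hx
  obtain ⟨t, _, rfl⟩ := hx
  positivity

theorem pvMid (p : List Char) (m : Int) :
    ((pvMasks (pvUnk p).length).filter (fun bs => decide (bs.sum ≤ m))).map
        (fun bs => pvApply bs (pvUnk p) p) = pvRec p m := by
  induction p generalizing m with
  | nil =>
    by_cases hm : 0 ≤ m <;>
      simp [pvUnk, PySem.List.enumerate_nil, pvMasks, pvBits, pvApply, pvRec, hm]
  | cons c rest ih =>
    have hnn := pvUnk_nonneg rest
    rw [pvUnk_cons]
    by_cases hc : c = '?'
    · subst hc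
      rw [if_pos rfl]
      simp only [List.length_cons, List.length_map]
      rw [pvMasks_succ, List.filter_append, List.filter_map, List.filter_map,
          List.map_append, List.map_map, List.map_map]
      show _ ++ _ = _
      rw [pvRec, if_pos rfl]
      congr 1
      · -- zero half
        have hfil : (pvMasks (pvUnk rest).length).filter
            ((fun bs => decide (bs.sum ≤ m)) ∘ (fun bs => 0 :: bs)) =
            (pvMasks (pvUnk rest).length).filter (fun bs => decide (bs.sum ≤ m)) := by
          apply List.filter_congr
          intro bs _
          simp
        rw [hfil, ← ih m, List.map_map]
        apply List.map_congr_left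
        intro bs _
        simp only [Function.comp]
        exact pvApply_head_zero bs (pvUnk rest) rest hnn
      · -- one half
        by_cases hm : 0 < m
        · rw [if_pos hm]
          have hfil : (pvMasks (pvUnk rest).length).filter
              ((fun bs => decide (bs.sum ≤ m)) ∘ (fun bs => 1 :: bs)) =
              (pvMasks (pvUnk rest).length).filter (fun bs => decide (bs.sum ≤ m - 1)) := by
            apply List.filter_congr
            intro bs _
            simp only [Function.comp, List.sum_cons, decide_eq_decide]
            omega
          rw [hfil, ← ih (m - 1), List.map_map]
          apply List.map_congr_left
          intro bs _
          simp only [Function.comp]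
          exact pvApply_head_one 1 (by norm_num) bs (pvUnk rest) rest hnn
        · rw [if_neg hm]
          have hfil : (pvMasks (pvUnk rest).length).filter
              ((fun bs => decide (bs.sum ≤ m)) ∘ (fun bs => 1 :: bs)) = [] := by
            rw [List.filter_eq_nil_iff]
            intro bs hbs
            have hs : 0 ≤ bs.sum := List.sum_nonneg (pvMasks_nonneg _ bs hbs)
            simp only [Function.comp, List.sum_cons, decide_eq_true_eq]
            omega
          rw [hfil, List.map_nil]
    · rw [if_neg hc]
      simp only [List.length_map]
      show _ = (pvRec (c :: rest) m)
      rw [pvRec.eq_def]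
      simp only [if_neg hc]
      rw [← ih m, List.map_map]
      apply List.map_congr_left
      intro bs _
      simp only [Function.comp]
      exact pvApply_shift bs (pvUnk rest) c rest hnn

theorem pvFoldl_skip {α β : Type} (q : α → Prop) [DecidablePred q] (f : α → β)
    (l : List α) (acc : List β) :
    l.foldl (fun acc x => if q x then acc else acc ++ [f x]) acc
      = acc ++ (l.filter (fun x => !decide (q x))).map f := by
  induction l generalizing acc with
  | nil => simp
  | cons x l ih =>
    rw [List.foldl_cons, List.filter_cons]
    by_cases h : q x
    · simp [h, ih]
    · simp [h, ih, List.append_assoc]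

theorem pvBits_of_port (kn : Nat) (j : Nat) :
    pvBitsPort (kn : Int) ((j : Nat) : Int) = pvBits kn j := by
  unfold pvBitsPort
  rw [PySem.List.pyRange_neg_one, List.map_map]
  unfold pvBits
  have hlen : ((kn : Int) - 1 - (-1)).toNat = kn := by omega
  rw [hlen]
  apply List.map_congr_left
  intro t ht
  simp only [List.mem_range] at ht
  simp only [Function.comp]
  have h1 : ((kn : Int) - 1 - (t : Int)).toNat = kn - 1 - t := by omega
  rw [h1]
  rw [Int.shiftRight_natCast j (kn - 1 - t)]
  exact_mod_cast PySem.Int.band_natCast (j >>> (kn - 1 - t)) 1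

theorem pvA_norm (pattern : String) (max : Int) :
    pattern_iterator pattern max =
      (((pvMasks (pvUnk pattern.toList).length).filter (fun bs => decide (bs.sum ≤ max))).map
        (fun bs => pvApply bs (pvUnk pattern.toList) pattern.toList)).map String.ofList := by
  unfold pattern_iterator
  simp only [PySem.List.len_eq, Int.toNat_natCast]
  generalize pattern.toList = cs
  generalize pvUnk cs = us
  congr 1
  rw [pvFoldl_skip (fun i : Int => (pvBitsPort (us.length : Int) i).sum > max)
        (fun i : Int => pvApply (pvBitsPort (us.length : Int) i) us cs),
      List.nil_append]
  have hpow : ((2 : Int) ^ us.length - 0).toNat = 2 ^ us.length := by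
    rw [sub_zero, show ((2 : Int) ^ us.length) = ((2 ^ us.length : Nat) : Int) by push_cast; ring]
    exact Int.toNat_natCast _
  rw [PySem.List.pyRange_one, hpow, List.filter_map, List.map_map]
  unfold pvMasks
  rw [List.filter_map, List.map_map]
  have hpred : (List.range (2 ^ us.length)).filter
      ((fun i : Int => !decide ((pvBitsPort (us.length : Int) i).sum > max)) ∘
        (fun k : Nat => (0 : Int) + k)) =
      (List.range (2 ^ us.length)).filter ((fun bs => decide (bs.sum ≤ max)) ∘ pvBits us.length) := by
    apply List.filter_congr
    intro j _
    simp only [Function.comp, zero_add]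
    rw [pvBits_of_port us.length j]
    rw [← decide_not, decide_eq_decide]
    omega
  rw [hpred]
  apply List.map_congr_left
  intro j _
  simp only [Function.comp, zero_add]
  rw [pvBits_of_port us.length j]

-- B's recursion commutes with an outer fixed character (indices shifted by one)
theorem pvRecB_shift (us : List Int) (m : Int) (c : Char) (t : List Char)
    (h : ∀ u ∈ us, 0 ≤ u) :
    pvRecB (us.map (· + 1)) m (c :: t) = (pvRecB us m t).map (fun s => c :: s) := by
  induction us generalizing m t with
  | nil => by_cases hm : m ≥ 0 <;> simp [pvRecB, hm]
  | cons u rest ih =>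
    have hu : 0 ≤ u := h u (by simp)
    have hrest : ∀ v ∈ rest, 0 ≤ v := fun v hv => h v (by simp [hv])
    rw [List.map_cons]
    simp only [pvRecB]
    rw [ih m t hrest]
    by_cases hm : m > 0
    · rw [if_pos hm, if_pos hm,
          pvSlice_to_cons c t u hu, pvSlice_from_cons c t (u + 1) (by omega),
          List.cons_append, ih (m - 1) _ hrest, List.map_append]
    · rw [if_neg hm, if_neg hm]
      simp
-- B's DFS over the '?' positions equals the per-character recursion
theorem pvRecB_eq (cs : List Char) (m : Int) : pvRecB (pvUnk cs) m cs = pvRec cs m := by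
  induction cs generalizing m with
  | nil =>
    by_cases hm : m ≥ 0 <;> simp [pvUnk, PySem.List.enumerate_nil, pvRecB, pvRec, hm]
  | cons c rest ih =>
    have hnn := pvUnk_nonneg rest
    rw [pvUnk_cons]
    by_cases hc : c = '?'
    · subst hc
      rw [if_pos rfl]
      simp only [pvRecB]
      rw [pvRec, if_pos rfl, pvRecB_shift _ m '?' rest hnn, ih m]
      congr 1
      by_cases hm : m > 0
      · rw [if_pos hm, if_pos hm]
        rw [PySem.List.slice_to _ (le_refl 0), PySem.List.slice_from _ (by omega : (0:Int) ≤ 0 + 1)]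
        simp only [Int.toNat_zero, List.take_zero, List.nil_append]
        rw [show ((0:Int) + 1).toNat = 1 by omega, List.drop_one, List.tail_cons]
        rw [pvRecB_shift _ (m - 1) '#' rest hnn, ih (m - 1)]
      · rw [if_neg hm, if_neg hm]
    · rw [if_neg hc]
      rw [pvRec.eq_def]
      simp only [if_neg hc]
      rw [pvRecB_shift _ m c rest hnn, ih m]

-- ===== VERDICT (by name: the statement is the Claim_ definition above) =====
theorem pattern_iterator_spec : Claim_equal_pattern_iterator := by
  intro pattern max _
  show _ = _
  rw [pvA_norm, pvMid]
  show _ = (pvRecB (pvUnk pattern.toList) max pattern.toList).map String.ofList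
  rw [pvRecB_eq]
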